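-- pv_equiv track=rewrite | github.com/D0gmaDev/improved_domino | domino_improved.py | statistics
-- ===== SOURCE A (Python) =====
-- def statistics(penalites: list[int]) -> list[int]:
--     rank_array = [0] * len(penalites)
--     for player, pen in enumerate(penalites):
--         rank = 1
--         for other_pl, other_pl in enumerate(penalites):
--             if other_pl < pen:
--                 rank += 1
--         rank_array[player] = rank
--     return rank_array
-- ===== SOURCE B (Python) =====
-- def statistics(penalites: list[int]) -> list[int]:
--     ranks = {}
--     for i, v in enumerate(sorted(penalites)):
--         if v not in ranks:
--             ranks[v] = i + 1
--     return [ranks[v] for v in penalites]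
-- ===== Notes on version B (the rewrite author's own statement) =====
-- stated objective: faster
-- what changed: Replaces the quadratic per-player scan by one sort plus a first-occurrence rank dictionary built in a single pass over the sorted list.
import Mathlib
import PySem

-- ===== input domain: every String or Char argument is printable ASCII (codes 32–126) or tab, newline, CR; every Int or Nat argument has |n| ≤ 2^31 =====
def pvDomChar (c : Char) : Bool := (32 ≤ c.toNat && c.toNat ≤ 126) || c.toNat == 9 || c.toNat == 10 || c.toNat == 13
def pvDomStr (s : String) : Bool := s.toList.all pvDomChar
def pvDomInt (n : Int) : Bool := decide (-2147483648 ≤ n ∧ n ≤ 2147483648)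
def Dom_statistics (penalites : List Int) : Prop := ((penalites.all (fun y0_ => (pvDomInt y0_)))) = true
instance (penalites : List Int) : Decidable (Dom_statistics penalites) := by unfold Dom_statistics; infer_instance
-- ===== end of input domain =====

-- B replaces A's quadratic per-player scan with one sort and a first-occurrence
-- rank dictionary built in a single pass (objective: faster).


-- ===== PORT A =====
-- rank_array = [0]*len; outer loop over enumerate(penalites); the inner loop's
-- 'for other_pl, other_pl in enumerate(...)' binds other_pl to the VALUE (the second
-- binding wins in Python), so it counts values strictly below pen.
-- player from enumerate is ≥ 0, so rank_array[player] = rank is List.set player.toNat (exact).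
def statistics (penalites : List Int) : List Int :=
  (PySem.List.enumerate penalites).foldl
    (fun rank_array pp =>
      let rank : Int :=
        (PySem.List.enumerate penalites).foldl
          (fun rank op => if op.2 < pp.2 then rank + 1 else rank) 1
      rank_array.set pp.1.toNat rank)
    (List.replicate penalites.length 0)

-- ===== PORT B =====
-- ranks[v] in the comprehension always hits (v ∈ penalites and sorted is a permutation of
-- penalites), so the KeyError-raising lookup is getD _ 0 (exact on every admitted input).
def statistics_alt (penalites : List Int) : List Int :=
  let s := PySem.List.sorted penalites (fun x => x) false
  let ranks :=
    (PySem.List.enumerate s).foldl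
      (fun d pp => if d.contains pp.2 then d else d.insert pp.2 (pp.1 + 1))
      PySem.Dict.empty
  penalites.map (fun v => ranks.getD v 0)

-- ===== PRECONDITION & SPEC =====
def Spec_statistics (penalites : List Int) (out : List Int) : Prop := out = statistics_alt penalites
instance (penalites : List Int) (out : List Int) : Decidable (Spec_statistics penalites out) := by unfold Spec_statistics; infer_instance

-- ===== CLAIM (what is proved, stated in full; the proofs are below) =====
def Claim_equal_statistics : Prop := ∀ (penalites : List Int), Dom_statistics penalites → Spec_statistics penalites (statistics penalites)

-- ===== LEMMAS AND PROOFS =====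

-- A's outer loop: setting slots s, s+1, … of an array of the right length is take-prefix ++ map.
theorem pvA_fold_set (f : Int → Int) :
    ∀ (xs : List Int) (s : Nat) (arr : List Int), arr.length = s + xs.length →
      (PySem.List.enumerate xs (s : Int)).foldl
        (fun rank_array pp => rank_array.set pp.1.toNat (f pp.2)) arr
      = arr.take s ++ xs.map f := by
  intro xs
  induction xs with
  | nil =>
    intro s arr h
    simp only [List.length_nil, Nat.add_zero] at h
    simp [PySem.List.enumerate_nil, List.take_of_length_le (Nat.le_of_eq h)]
  | cons x t ih =>
    intro s arr h
    rw [PySem.List.enumerate_cons]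
    have hs : s < arr.length := by simp at h; omega
    have hpush : ((s : Int) + 1) = ((s + 1 : Nat) : Int) := by push_cast; ring
    simp only [List.foldl_cons, Int.toNat_natCast, hpush]
    rw [ih (s + 1) (arr.set s (f x)) (by simp at h ⊢; omega)]
    have htake : (arr.set s (f x)).take (s + 1) = arr.take s ++ [f x] := by
      rw [List.set_eq_take_append_cons_drop, if_pos hs, List.take_append]
      have hlen : (arr.take s).length = s := by simp [List.length_take]; omega
      rw [List.take_of_length_le (by omega), hlen]
      simp
    rw [htake, List.append_assoc]
    simp [List.map]

-- A computes, for each player, 1 + (number of strictly smaller penalties).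
theorem pvA_eq_map (penalites : List Int) :
    statistics penalites
      = penalites.map (fun p => 1 + (penalites.countP (fun x => decide (x < p)) : Int)) := by
  unfold statistics
  have hinner : ∀ p : Int,
      (PySem.List.enumerate penalites).foldl
        (fun rank op => if op.2 < p then rank + 1 else rank) (1 : Int)
      = 1 + (penalites.countP (fun x => decide (x < p)) : Int) := by
    intro p
    rw [PySem.List.foldl_ite_add_one (fun op : Int × Int => op.2 < p)]
    congr 2
    conv_rhs => rw [← PySem.List.map_snd_enumerate penalites 0]
    rw [List.countP_map]
    rfl
  have hmain := pvA_fold_set (fun p => 1 + (penalites.countP (fun x => decide (x < p)) : Int))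
      penalites 0 (List.replicate penalites.length 0) (by simp)
  simp only [Nat.cast_zero, List.take_zero, List.nil_append] at hmain
  rw [← hmain]
  congr 1
  funext arr pp
  simp only [hinner pp.2]

-- B's dict loop: first-occurrence insertion; lookup falls through to start + first index + 1.
theorem pvB_dict_get (v : Int) :
    ∀ (l : List Int) (start : Int) (d : PySem.Dict Int Int),
      ((PySem.List.enumerate l start).foldl
        (fun d pp => if d.contains pp.2 then d else d.insert pp.2 (pp.1 + 1)) d).get? v
      = (match d.get? v with
         | some w => some w
         | none => (PySem.List.index? l v).map (fun i => start + (i : Int) + 1)) := by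
  intro l
  induction l with
  | nil =>
    intro start d
    simp only [PySem.List.enumerate_nil, List.foldl_nil]
    cases h : d.get? v <;> simp [PySem.List.index?_eq_idxOf?]
  | cons x t ih =>
    intro start d
    rw [PySem.List.enumerate_cons]
    simp only [List.foldl_cons]
    by_cases hxv : x = v
    · by_cases hc : d.contains x = true
      · rw [if_pos hc, ih]
        cases hw : d.get? v with
        | some w => rfl
        | none =>
          rw [PySem.Dict.get?_eq_none_iff_contains] at hw
          rw [hxv, hw] at hc; cases hc
      · rw [if_neg hc, ih]
        have hd : d.get? v = none := by
          rw [PySem.Dict.get?_eq_none_iff_contains, ← hxv]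
          simpa using hc
        rw [hd]
        have hins : (d.insert x (start + 1)).get? v = some (start + 1) := by
          rw [hxv]; exact PySem.Dict.get?_insert_self d v (start + 1)
        rw [hins, hxv, PySem.List.index?_cons_self]
        simp
    · have hstep : (if d.contains x then d else d.insert x (start + 1)).get? v = d.get? v := by
        split
        · rfl
        · exact PySem.Dict.get?_insert_of_ne d (start + 1) (fun h => hxv h.symm)
      rw [ih, hstep, PySem.List.index?_cons_of_ne t hxv]
      cases hg : d.get? v with
      | some w => rfl
      | none =>
        simp only []
        cases hti : PySem.List.index? t v with
        | none => rfl
        | some i => simp [Option.map]; ring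
-- In a ≤-sorted list, the first index of a member v counts the elements strictly below v.
theorem pvIndex_sorted (v : Int) :
    ∀ (s : List Int), s.Pairwise (fun a b => a ≤ b) → v ∈ s →
      PySem.List.index? s v = some (s.countP (fun x => decide (x < v))) := by
  intro s
  induction s with
  | nil => intro _ h; simp at h
  | cons a t ih =>
    intro hp hm
    have hpt : t.Pairwise (fun a b : Int => a ≤ b) := (List.pairwise_cons.mp hp).2
    have hle : ∀ y ∈ t, a ≤ y := (List.pairwise_cons.mp hp).1
    by_cases hav : a = v
    · subst hav
      rw [PySem.List.index?_cons_self]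
      have h0 : t.countP (fun x => decide (x < a)) = 0 := by
        rw [List.countP_eq_zero]
        intro x hx
        simp only [decide_eq_true_eq, not_lt]
        exact hle x hx
      simp [h0]
    · have hmt : v ∈ t := by
        rcases List.mem_cons.mp hm with h | h
        · exact absurd h.symm hav
        · exact h
      have hav' : a < v := lt_of_le_of_ne (hle v hmt) hav
      rw [PySem.List.index?_cons_of_ne t hav, ih hpt hmt]
      simp [hav']

-- ===== VERDICT (by name: the statement is the Claim_ definition above) =====
theorem statistics_spec : Claim_equal_statistics := by
  intro penalites _
  unfold Spec_statistics statistics_alt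
  rw [pvA_eq_map]
  apply List.map_congr_left
  intro v hv
  have hperm : (PySem.List.sorted penalites (fun x => x) false).Perm penalites :=
    PySem.List.sorted_perm penalites (fun x => x) false
  have hpair : (PySem.List.sorted penalites (fun x => x) false).Pairwise
      (fun a b : Int => a ≤ b) := PySem.List.sorted_pairwise penalites (fun x => x)
  have hvm : v ∈ PySem.List.sorted penalites (fun x => x) false := hperm.mem_iff.mpr hv
  have hidx := pvIndex_sorted v _ hpair hvm
  have hget := pvB_dict_get v (PySem.List.sorted penalites (fun x => x) false) 0 PySem.Dict.empty
  rw [hidx, PySem.Dict.get?_empty] at hget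
  simp only [Option.map] at hget
  rw [PySem.Dict.getD_eq_get?_getD, hget]
  rw [hperm.countP_eq]
  simp [Option.getD]
  ring
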